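/- GENERATED by mk_final_copies.py from the proof of the farm's unit `vorbis_decode_initial.6` (farm:vorbis_decode_initial.6.1: Proof.lean) as the
   re-elaboration sweep compiled it — do not edit. -/
import Asan.CheckWalk
import Vorbis.Spec.Units.vorbis_decode_initial_6

open X86 X86.User Asan Vorbis Vorbis.Spec Vorbis.Spec.vorbis_decode_initial

set_option maxRecDepth 4000
set_option maxHeartbeats 4000000

/-- Segment 6 of `vorbis_decode_initial` (0x113265–0x11327e + 0x1132df–0x113312, 18 instructions, two check sites, two calls of
get_bits; stb_vorbis_fixed.c 3177–3185): `if (m->blockflag)` — the byte at r14 is read UNCHECKED at 0x113265 (`side_has` from where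
`*f` lies) —, the long arm `n = f->blocksize_1 ; prev = get_bits(f,1) ; next = get_bits(f,1)`, the short arm `prev = next = 0 ; n =
f->blocksize_0`: from `IAtM` at `ret12` to `IAtWin` at the join `at_113282`, with `bf`, `n` read in the ENTRY memory (through
`IFrame.same`). The frame over each call by `IFrame.carry_call`, over the own stores by `IFrame.carry`. -/
theorem Vorbis.Spec.Worked.vorbis_decode_initial_6_ok : Vorbis.Spec.vorbis_decode_initial_6.Statement := by
  intro Lay hLay μ hμ u₀ hcode hload4 h_gb others frames len A stored room ysz u ret i s hE hs
  have he := hE.entry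
  have hpre := hE.pre
  have hgb := h_gb others frames (RunBlk A len) len
  v_entry he
  have hsp := hpre.1.rsp
  obtain ⟨hsh, hinv, hpls, hple, hprs, hpre_, hpm, hapart⟩ := hpre
  have hobj := hinv.objLive
  have hwhere := hobj.where_ hsh.inv hsh.offText (by decide)
  simp only [Off.sizeof.stb_vorbis] at hwhere
  have henv := hinv.readerEnv
  have hwm := hpm.1.where_ hsh.inv hsh.offText (by decide)
  have hoff := hinv.objOff
  simp only [Off.sizeof.stb_vorbis] at hoff
  obtain ⟨_, a1, a2⟩ := hpls
  obtain ⟨_, b1, b2⟩ := hple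
  obtain ⟨_, c1, c2⟩ := hprs
  obtain ⟨_, d1, d2⟩ := hpre_
  obtain ⟨_, e1, e2⟩ := hpm
  clear hapart hinv
  obtain ⟨w_rip, w_rsp, w_rbx, w_r12, w_r13, w_r14, w_r15, w_rbp, hilt, hmode, w_kept, hfr0⟩ := hs
  have w_eq := hfr0.code
  have hsame := hfr0.same
  have hun := hfr0.un
  have hbits := hfr0.bits
  have hdf := hfr0.df
  have hmx := hfr0.mx
  have hm64 : (addr ((u.reg .rdi).toNat + 484 + 6 * i)).toNat = (u.reg .rdi).toNat + 484 + 6 * i := toNat_addr _ (by omega)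
  have a152 : (u.reg .rdi + 152).toNat = (u.reg .rdi).toNat + 152 := toNat_add_ofNat (u.reg .rdi) 152 (by omega)
  have a156 : (u.reg .rdi + 156).toNat = (u.reg .rdi).toNat + 156 := toNat_add_ofNat (u.reg .rdi) 156 (by omega)
  -- the three fields read in the present memory as in the entry memory: they are off the footprint
  have eflag : s.mem.readLE (addr ((u.reg .rdi).toNat + 484 + 6 * i)) 1 =
      u.mem.readLE (addr ((u.reg .rdi).toNat + 484 + 6 * i)) 1 :=
    hsame.readLE _ 1 (by omega) (by
      intro w hw
      simp only [List.mem_cons, List.not_mem_nil, or_false] at hw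
      rcases hw with rfl | rfl | rfl | rfl | rfl | rfl | rfl | rfl | rfl | rfl | rfl | rfl <;> simp only [] <;> omega)
  have eb0 : s.mem.readLE (u.reg .rdi + 152) 4 = u.mem.readLE (u.reg .rdi + 152) 4 :=
    hsame.readLE _ 4 (by omega) (by
      intro w hw
      simp only [List.mem_cons, List.not_mem_nil, or_false] at hw
      rcases hw with rfl | rfl | rfl | rfl | rfl | rfl | rfl | rfl | rfl | rfl | rfl | rfl <;> simp only [] <;> omega)
  have eb1 : s.mem.readLE (u.reg .rdi + 156) 4 = u.mem.readLE (u.reg .rdi + 156) 4 :=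
    hsame.readLE _ 4 (by omega) (by
      intro w hw
      simp only [List.mem_cons, List.not_mem_nil, or_false] at hw
      rcases hw with rfl | rfl | rfl | rfl | rfl | rfl | rfl | rfl | rfl | rfl | rfl | rfl <;> simp only [] <;> omega)
  have hflt := X86.User.Mem.readLE_lt s.mem (addr ((u.reg .rdi).toNat + 484 + 6 * i)) 1
  u_walk hcode [hμ.vendor] until [Vorbis.L.vorbis_decode_initial.at_113282] span [Vorbis.L.textLo, Vorbis.L.textHi] side (v_side)
  case check_1132e6 =>
    have hun' : ShadowUntouched u.mem s_1132e6.mem := by v_untouched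
    refine hobj.accSmall hsh.inv hun' _ 4 (by decide) (by u_omega) ?_
    simp only [Vorbis.Off.sizeof.stb_vorbis]
    u_omega
  case check_113272 =>
    have hun' : ShadowUntouched u.mem s_113272.mem := by v_untouched
    refine hobj.accSmall hsh.inv hun' _ 4 (by decide) (by u_omega) ?_
    simp only [Vorbis.Off.sizeof.stb_vorbis]
    u_omega
  case call_inv =>
    v_inv
  case pre_1132fa =>
    have hun' : ShadowUntouched u.mem s_1132fa.mem := by v_untouched
    have hsh' : ShadowPre others frames s_1132fa := hsh.call hun' (by u_omega) (by u_omega) (by u_omega)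
    have hkeep := Reader.store_off_obj hbits (u.reg .rsp - 96) 8 1127167 (by u_omega) (by u_omega)
    rw [← w_mem] at hkeep
    refine ⟨⟨hsh', ?_, ?_⟩, ?_⟩
    · rw [w_rdi]
      exact henv
    · rw [w_rdi]
      exact hkeep.1.bits
    · rw [bitsArg_def, w_rsi]
      decide
  rotate_left
  · -- the short arm: 0x11327e stored `next = 0`; `n = f->blocksize_0`
    have hS : Mem.SameExcept [⟨(u.reg .rsp).toNat - 96, (u.reg .rsp).toNat - 88⟩,
        ⟨(u.reg .rsp).toNat - 60, (u.reg .rsp).toNat - 56⟩] s.mem s_11327e.mem := by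
      rw [w_mem]
      u_same
    have hunq : ShadowUntouched u.mem s_11327e.mem := by v_untouched
    have hk := di_keep hbits hS (by
      intro w hw
      simp only [List.mem_cons, List.not_mem_nil, or_false] at hw
      rcases hw with rfl | rfl <;> simp only [] <;> omega)
    have hfrq : IFrame (RunBlk A len) len u₀ u ret
        [⟨(u.reg .rsp).toNat - 448, (u.reg .rsp).toNat⟩,
      ⟨(u.reg .rdi).toNat + 48, (u.reg .rdi).toNat + 56⟩, ⟨(u.reg .rdi).toNat + 84, (u.reg .rdi).toNat + 96⟩,
      ⟨(u.reg .rdi).toNat + 136, (u.reg .rdi).toNat + 144⟩, ⟨(u.reg .rdi).toNat + 1484, (u.reg .rdi).toNat + 1749⟩,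
      ⟨(u.reg .rdi).toNat + 1752, (u.reg .rdi).toNat + 1784⟩, ⟨(u.reg .rdi).toNat + 1796, (u.reg .rdi).toNat + 1804⟩,
      ⟨(u.reg .rsi).toNat, (u.reg .rsi).toNat + 4⟩, ⟨(u.reg .rdx).toNat, (u.reg .rdx).toNat + 4⟩,
      ⟨(u.reg .rcx).toNat, (u.reg .rcx).toNat + 4⟩, ⟨(u.reg .r8).toNat, (u.reg .r8).toNat + 4⟩,
      ⟨(u.reg .r9).toNat, (u.reg .r9).toNat + 4⟩] s_11327e := by
      refine IFrame.carry hfr0 (by omega) (by omega) hS ?_ ?_ w_eq hunq ?_ ?_ hk.1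
      · intro w hw
        simp only [List.mem_cons, List.not_mem_nil, or_false] at hw
        rcases hw with rfl | rfl <;> exact ⟨_, List.mem_cons_self, by simp only []; omega, by simp only []; omega⟩
      · intro w hw
        simp only [List.mem_cons, List.not_mem_nil, or_false] at hw
        rcases hw with rfl | rfl <;> (simp only []; omega)
      · rw [w_flags]
        exact w_df_113272
      · rw [w_mxcsr]
        exact hmx
    refine ReachVia.done ⟨u.mem.readLE (addr ((u.reg .rdi).toNat + 484 + 6 * i)) 1, u.mem.readLE (u.reg .rdi + 152) 4, ?_⟩
    refine ⟨w_rip, w_rsp, w_rbx, w_r12, w_r13, w_r14, ?_, hilt, ?_, rfl, fun _ => rfl, ?_, w_kept.mono_all (by rfl), hfrq⟩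
    · rw [w_r15]
      have e : (s.mem.writeLE (u.reg .rsp - 96) 8 1127031).readLE (u.reg .rdi + 152) 4 =
          u.mem.readLE (u.reg .rdi + 152) 4 := by
        u_read
        try exact eb0
      rw [e]
    · rw [hS.readLE (u.reg .r9) 4 (by omega) (by
        intro w hw
        simp only [List.mem_cons, List.not_mem_nil, or_false] at hw
        rcases hw with rfl | rfl <;> simp only [] <;> omega)]
      exact hmode
    · intro hne
      exfalso
      rw [← eflag] at hne
      omega
  -- the long arm: 0x1132ff, the state the first get_bits(f, 1) returned (`prev`)
  have c_rdi_1132fa := w_rdi_1132fa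
  v_after_call w_rsp_1132fa w_mem_1132fa
  simp only [c_rdi_1132fa] at w_same
  have hn_1132fa : bitsArg s_1132fa = 1 := by
    rw [bitsArg_def, w_rsi_1132fa]
    decide
  have hpost_1132fa : GetBitsPost (RunBlk A len) len s_1132fa.mem s_1132far.mem (u.reg .rdi).toNat 1
      (s_1132far.reg .rax).toNat := by
    have h := w_post.bits
    rw [c_rdi_1132fa, hn_1132fa] at h
    exact h
  have hunr_1132fa : ShadowUntouched u.mem s_1132far.mem := by v_untouched
  have hfr1 : IFrame (RunBlk A len) len u₀ u ret
      [⟨(u.reg .rsp).toNat - 448, (u.reg .rsp).toNat⟩,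
      ⟨(u.reg .rdi).toNat + 48, (u.reg .rdi).toNat + 56⟩, ⟨(u.reg .rdi).toNat + 84, (u.reg .rdi).toNat + 96⟩,
      ⟨(u.reg .rdi).toNat + 136, (u.reg .rdi).toNat + 144⟩, ⟨(u.reg .rdi).toNat + 1484, (u.reg .rdi).toNat + 1749⟩,
      ⟨(u.reg .rdi).toNat + 1752, (u.reg .rdi).toNat + 1784⟩, ⟨(u.reg .rdi).toNat + 1796, (u.reg .rdi).toNat + 1804⟩,
      ⟨(u.reg .rsi).toNat, (u.reg .rsi).toNat + 4⟩, ⟨(u.reg .rdx).toNat, (u.reg .rdx).toNat + 4⟩,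
      ⟨(u.reg .rcx).toNat, (u.reg .rcx).toNat + 4⟩, ⟨(u.reg .r8).toNat, (u.reg .r8).toNat + 4⟩,
      ⟨(u.reg .r9).toNat, (u.reg .r9).toNat + 4⟩] s_1132far := by
    exact IFrame.carry_get_bits hfr0 1127167 352 (Nat.le_refl _) (by omega) (by omega) hoff w_same w_eq hunr_1132fa w_df w_mx
      hpost_1132fa.bits
  have hmode_1132fa : s_1132far.mem.readLE (u.reg .r9) 4 = i := by u_frame hmode

  have hbits1 := hpost_1132fa.bits
  clear w_same w_post hpost_1132fa hsame hbits hun hmode hfr0 hdf hmx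
  have hun1 := hfr1.un
  have hsame1 := hfr1.same
  u_walk hcode [hμ.vendor] until [Vorbis.L.vorbis_decode_initial.at_113282] span [Vorbis.L.textLo, Vorbis.L.textHi] side (v_side)
  case call_inv =>
    v_inv
  case pre_113309 =>
    have hun' : ShadowUntouched u.mem s_113309.mem := by v_untouched
    have hsh' : ShadowPre others frames s_113309 := hsh.call hun' (by u_omega) (by u_omega) (by u_omega)
    have hkeep := Reader.store_off_obj hbits1 (u.reg .rsp - 96) 8 1127182 (by u_omega) (by u_omega)
    rw [← w_mem] at hkeep
    refine ⟨⟨hsh', ?_, ?_⟩, ?_⟩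
    · rw [w_rdi]
      exact henv
    · rw [w_rdi]
      exact hkeep.1.bits
    · rw [bitsArg_def, w_rsi]
      decide
  -- 0x11330e, the state the second get_bits(f, 1) returned (`next`)
  have c_rdi_113309 := w_rdi_113309
  v_after_call w_rsp_113309 w_mem_113309
  simp only [c_rdi_113309] at w_same
  have hn_113309 : bitsArg s_113309 = 1 := by
    rw [bitsArg_def, w_rsi_113309]
    decide
  have hpost_113309 : GetBitsPost (RunBlk A len) len s_113309.mem s_113309r.mem (u.reg .rdi).toNat 1
      (s_113309r.reg .rax).toNat := by
    have h := w_post.bits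
    rw [c_rdi_113309, hn_113309] at h
    exact h
  have hunr_113309 : ShadowUntouched u.mem s_113309r.mem := by v_untouched
  have hfr2 : IFrame (RunBlk A len) len u₀ u ret
      [⟨(u.reg .rsp).toNat - 448, (u.reg .rsp).toNat⟩,
      ⟨(u.reg .rdi).toNat + 48, (u.reg .rdi).toNat + 56⟩, ⟨(u.reg .rdi).toNat + 84, (u.reg .rdi).toNat + 96⟩,
      ⟨(u.reg .rdi).toNat + 136, (u.reg .rdi).toNat + 144⟩, ⟨(u.reg .rdi).toNat + 1484, (u.reg .rdi).toNat + 1749⟩,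
      ⟨(u.reg .rdi).toNat + 1752, (u.reg .rdi).toNat + 1784⟩, ⟨(u.reg .rdi).toNat + 1796, (u.reg .rdi).toNat + 1804⟩,
      ⟨(u.reg .rsi).toNat, (u.reg .rsi).toNat + 4⟩, ⟨(u.reg .rdx).toNat, (u.reg .rdx).toNat + 4⟩,
      ⟨(u.reg .rcx).toNat, (u.reg .rcx).toNat + 4⟩, ⟨(u.reg .r8).toNat, (u.reg .r8).toNat + 4⟩,
      ⟨(u.reg .r9).toNat, (u.reg .r9).toNat + 4⟩] s_113309r := by
    exact IFrame.carry_get_bits hfr1 1127182 352 (Nat.le_refl _) (by omega) (by omega) hoff w_same w_eq hunr_113309 w_df w_mx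
      hpost_113309.bits
  have hmode_113309 : s_113309r.mem.readLE (u.reg .r9) 4 = i := by u_frame hmode_1132fa

  have hbits2 := hpost_113309.bits
  clear w_same w_post hpost_113309 hbits1 hunr_1132fa hmode_1132fa hfr1 hun1 hsame1
  have hun2 := hfr2.un
  have hsame2 := hfr2.same
  u_walk hcode [hμ.vendor] until [Vorbis.L.vorbis_decode_initial.at_113282] span [Vorbis.L.textLo, Vorbis.L.textHi] side (v_side)
  -- 0x113282 through `jmp`: `next` is stored
  have hS : Mem.SameExcept [⟨(u.reg .rsp).toNat - 60, (u.reg .rsp).toNat - 56⟩] s_113309r.mem s_113312.mem := by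
    rw [w_mem]
    u_same
  have hunq : ShadowUntouched u.mem s_113312.mem := by v_untouched
  have hk := di_keep hbits2 hS (by
    intro w hw
    simp only [List.mem_cons, List.not_mem_nil, or_false] at hw
    rcases hw with rfl <;> simp only [] <;> omega)
  have hfrq : IFrame (RunBlk A len) len u₀ u ret
      [⟨(u.reg .rsp).toNat - 448, (u.reg .rsp).toNat⟩,
      ⟨(u.reg .rdi).toNat + 48, (u.reg .rdi).toNat + 56⟩, ⟨(u.reg .rdi).toNat + 84, (u.reg .rdi).toNat + 96⟩,
      ⟨(u.reg .rdi).toNat + 136, (u.reg .rdi).toNat + 144⟩, ⟨(u.reg .rdi).toNat + 1484, (u.reg .rdi).toNat + 1749⟩,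
      ⟨(u.reg .rdi).toNat + 1752, (u.reg .rdi).toNat + 1784⟩, ⟨(u.reg .rdi).toNat + 1796, (u.reg .rdi).toNat + 1804⟩,
      ⟨(u.reg .rsi).toNat, (u.reg .rsi).toNat + 4⟩, ⟨(u.reg .rdx).toNat, (u.reg .rdx).toNat + 4⟩,
      ⟨(u.reg .rcx).toNat, (u.reg .rcx).toNat + 4⟩, ⟨(u.reg .r8).toNat, (u.reg .r8).toNat + 4⟩,
      ⟨(u.reg .r9).toNat, (u.reg .r9).toNat + 4⟩] s_113312 := by
    refine IFrame.carry hfr2 (by omega) (by omega) hS ?_ ?_ w_eq hunq ?_ ?_ hk.1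
    · intro w hw
      simp only [List.mem_cons, List.not_mem_nil, or_false] at hw
      rcases hw with rfl
      exact ⟨_, List.mem_cons_self, by simp only []; omega, by simp only []; omega⟩
    · intro w hw
      simp only [List.mem_cons, List.not_mem_nil, or_false] at hw
      rcases hw with rfl <;> (simp only []; omega)
    · rw [w_flags]
      exact w_df
    · rw [w_mxcsr]
      exact w_mx
  refine ReachVia.done ⟨u.mem.readLE (addr ((u.reg .rdi).toNat + 484 + 6 * i)) 1, u.mem.readLE (u.reg .rdi + 156) 4, ?_⟩
  refine ⟨w_rip, w_rsp, w_rbx, w_r12, w_r13, w_r14, ?_, hilt, ?_, rfl, ?_, fun _ => rfl, w_kept.mono_all (by rfl), hfrq⟩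
  · rw [w_r15]
    have e : (s.mem.writeLE (u.reg .rsp - 96) 8 1127147).readLE (u.reg .rdi + 156) 4 =
        u.mem.readLE (u.reg .rdi + 156) 4 := by
      u_read
      try exact eb1
    rw [e]
  · rw [hS.readLE (u.reg .r9) 4 (by omega) (by
      intro w hw
      simp only [List.mem_cons, List.not_mem_nil, or_false] at hw
      rcases hw with rfl <;> simp only [] <;> omega)]
    exact hmode_113309
  · intro h0
    exfalso
    rw [← eflag] at h0
    omega
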